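-- pv_equiv track=rewrite | github.com/TahaAlselwi/equalcare | backend/transcript_service.py | build_dialog_lines
-- ===== SOURCE A (Python) =====
-- from typing import Dict, List
--
-- def build_dialog_lines(items: List[Dict[str, str]]) -> str:
--     """
--     Merge consecutive entries with the same tag and format as dialog lines:
--       A: ...
--       B: ...
--     """
--     merged: List[Dict[str, str]] = []
--
--     for it in items:
--         tag = it.get("tag", "")
--         text = (it.get("text", "") or "").strip()
--         if not text:
--             continue
--
--         if merged and merged[-1]["tag"] == tag:
--             merged[-1]["text"] = (merged[-1]["text"] + " " + text).strip()
--         else: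
--             merged.append({"tag": tag, "text": text})
--
--     return "\n".join(f"{m['tag']}: {m['text']}" for m in merged) if merged else ""
-- ===== SOURCE B (Python) =====
-- from typing import Dict, List
--
-- def build_dialog_lines(items: List[Dict[str, str]]) -> str:
--     """
--     Merge consecutive entries with the same tag and format as dialog lines.
--     Filter-then-group: drop empty entries first, then collapse each maximal
--     run of consecutive equal tags into one line joined by single spaces.
--     """
--     pairs = [(it.get("tag", ""), t)
--              for it in items
--              if (t := (it.get("text", "") or "").strip())]
--     lines = []
--     i = 0
--     n = len(pairs)
--     while i < n:
--         tag, parts = pairs[i][0], [pairs[i][1]]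
--         i += 1
--         while i < n and pairs[i][0] == tag:
--             parts.append(pairs[i][1])
--             i += 1
--         lines.append(f"{tag}: {' '.join(parts)}")
--     return "\n".join(lines)
-- ===== Notes on version B (the rewrite author's own statement) =====
-- stated objective: idiomatic
-- what changed: Instead of A's single pass that mutates the last element of a growing merged list (re-stripping the concatenation each time), B first filters the items down to non-empty (tag, stripped-text) pairs and then emits one line per maximal run of equal consecutive tags, joining each run's texts with single spaces.
import Mathlib
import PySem

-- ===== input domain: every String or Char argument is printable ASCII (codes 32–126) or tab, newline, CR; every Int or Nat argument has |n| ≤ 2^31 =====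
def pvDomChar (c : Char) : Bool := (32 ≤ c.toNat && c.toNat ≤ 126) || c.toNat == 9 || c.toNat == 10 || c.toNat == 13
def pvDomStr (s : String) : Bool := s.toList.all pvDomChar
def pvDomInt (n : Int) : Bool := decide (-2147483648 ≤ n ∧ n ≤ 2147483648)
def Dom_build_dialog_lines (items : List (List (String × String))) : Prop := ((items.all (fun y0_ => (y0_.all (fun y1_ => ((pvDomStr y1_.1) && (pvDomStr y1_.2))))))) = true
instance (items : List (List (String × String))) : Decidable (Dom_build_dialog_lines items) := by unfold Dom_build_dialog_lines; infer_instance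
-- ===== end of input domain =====

-- B replaces A's mutate-the-last-merged-entry pass by a filter-then-group decomposition (idiomatic; same cost).

-- ===== PORT A =====
-- Python '+' on strings (exact: concatenation of code points)
def pvCat (a b : String) : String := String.ofList (a.toList ++ b.toList)

-- one iteration of A's 'for it in items' loop over the accumulator 'merged'
def pvStepA (acc : List (String × String)) (it : List (String × String)) : List (String × String) :=
  let tag := PySem.Dict.getD (PySem.Dict.mk it) "tag" ""
  let text := PySem.Str.strip (PySem.Dict.getD (PySem.Dict.mk it) "text" "")
  if text = "" then acc
  else
    match acc.getLast? with
    | some last =>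
      if last.1 = tag then
        acc.dropLast ++ [(last.1, PySem.Str.strip (pvCat (pvCat last.2 " ") text))]
      else acc ++ [(tag, text)]
    | none => acc ++ [(tag, text)]

def build_dialog_lines (items : List (List (String × String))) : String :=
  let merged := items.foldl pvStepA []
  if merged = [] then ""
  else PySem.Str.join "\n" (merged.map (fun m => pvCat (pvCat m.1 ": ") m.2))

-- ===== PORT B =====
-- the filtering comprehension: non-empty (tag, stripped text) pairs
def pvPairs (items : List (List (String × String))) : List (String × String) :=
  items.filterMap (fun it =>
    let t := PySem.Str.strip (PySem.Dict.getD (PySem.Dict.mk it) "text" "")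
    if t = "" then none else some (PySem.Dict.getD (PySem.Dict.mk it) "tag" "", t))

-- B's inner while loop: collect the texts of the leading run of entries tagged 'tag', return them with the remainder
def pvRun (tag : String) : List (String × String) → List String × List (String × String)
  | [] => ([], [])
  | (t, x) :: r =>
    if t = tag then
      let res := pvRun tag r
      (x :: res.1, res.2)
    else ([], (t, x) :: r)

theorem pvRun_snd_length_le (tag : String) (l : List (String × String)) : (pvRun tag l).2.length ≤ l.length := by
  induction l with
  | nil => simp [pvRun]
  | cons p r ih =>
    obtain ⟨t, x⟩ := p
    by_cases h : t = tag
    · simp [pvRun, h]; omega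
    · simp [pvRun, h]

-- B's outer while loop: one formatted line per maximal run of equal consecutive tags
def pvLines : List (String × String) → List String
  | [] => []
  | (t, x) :: r =>
    let res := pvRun t r
    pvCat (pvCat t ": ") (PySem.Str.join " " (x :: res.1)) :: pvLines res.2
termination_by l => l.length
decreasing_by
  simpa using Nat.lt_succ_of_le (pvRun_snd_length_le t r)

def build_dialog_lines_alt (items : List (List (String × String))) : String :=
  PySem.Str.join "\n" (pvLines (pvPairs items))

-- ===== PRECONDITION & SPEC =====
def Spec_build_dialog_lines (items : List (List (String × String))) (out : String) : Prop := out = build_dialog_lines_alt items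
instance (items : List (List (String × String))) (out : String) : Decidable (Spec_build_dialog_lines items out) := by unfold Spec_build_dialog_lines; infer_instance

-- ===== CLAIM (what is proved, stated in full; the proofs are below) =====
def Claim_equal_build_dialog_lines : Prop := ∀ (items : List (List (String × String))), Dom_build_dialog_lines items → Spec_build_dialog_lines items (build_dialog_lines items)

-- ===== LEMMAS AND PROOFS =====

-- 'stripped and non-empty' — the invariant of every text stored in A's 'merged'
def pvSCs (s : String) : Prop := s ≠ "" ∧ PySem.Str.strip s = s

-- A's merging step with the redundant outer strip removed (justified by pvStr_strip_cat below)
def pvMStep (acc : List (String × String)) (p : String × String) : List (String × String) :=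
  match acc.getLast? with
  | some last =>
    if last.1 = p.1 then acc.dropLast ++ [(last.1, pvCat (pvCat last.2 " ") p.2)]
    else acc ++ [p]
  | none => acc ++ [p]

def pvFmt (m : String × String) : String := pvCat (pvCat m.1 ": ") m.2

theorem pv_dropWhile_head (p : Char → Bool) (l : List Char) (h : List.dropWhile p l = l)
    (c : Char) (hc : l.head? = some c) : p c = false := by
  cases l with
  | nil => simp at hc
  | cons d t =>
    simp at hc; subst hc
    by_contra hsp
    simp only [Bool.not_eq_false] at hsp
    simp only [List.dropWhile_cons, hsp, if_true] at h
    have := (List.dropWhile_suffix (l := t) p).length_le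
    rw [h] at this; simp at this

theorem pvChars_lstrip_eq_self_of_strip (l : List Char) (h : PySem.Chars.strip l = l) :
    PySem.Chars.lstrip l = l := by
  have hsuf : PySem.Chars.lstrip l <:+ l := List.dropWhile_suffix _
  have h1 : (PySem.Chars.strip l).length ≤ (PySem.Chars.lstrip l).length := by
    simp only [PySem.Chars.strip, PySem.Chars.rstrip]
    have := (List.dropWhile_suffix (l := (PySem.Chars.lstrip l).reverse) PySem.Chars.isspace).length_le
    simpa using this
  exact hsuf.eq_of_length (le_antisymm hsuf.length_le (by rw [h] at h1; exact h1))

theorem pvChars_rstrip_eq_self_of_strip (l : List Char) (h : PySem.Chars.strip l = l) :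
    PySem.Chars.rstrip l = l := by
  have hl := pvChars_lstrip_eq_self_of_strip l h
  have h2 : PySem.Chars.strip l = PySem.Chars.rstrip l := by
    simp only [PySem.Chars.strip, PySem.Chars.lstrip] at hl ⊢; rw [hl]
  rw [h2] at h; exact h

theorem pvChars_head_not_space (l : List Char) (h : PySem.Chars.strip l = l) :
    ∀ c, l.head? = some c → PySem.Chars.isspace c = false := fun c hc =>
  pv_dropWhile_head _ l (pvChars_lstrip_eq_self_of_strip l h) c hc

theorem pvChars_last_not_space (l : List Char) (h : PySem.Chars.strip l = l) :
    ∀ c, l.getLast? = some c → PySem.Chars.isspace c = false := by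
  intro c hc
  have hr := pvChars_rstrip_eq_self_of_strip l h
  have hdw : List.dropWhile PySem.Chars.isspace l.reverse = l.reverse := by
    have := congrArg List.reverse hr
    simpa [PySem.Chars.rstrip] using this
  exact pv_dropWhile_head _ l.reverse hdw c (by simpa [List.head?_reverse] using hc)

theorem pvChars_strip_eq_self (l : List Char)
    (hh : ∀ c, l.head? = some c → PySem.Chars.isspace c = false)
    (hl : ∀ c, l.getLast? = some c → PySem.Chars.isspace c = false) :
    PySem.Chars.strip l = l := by
  rcases List.eq_nil_or_concat l with rfl | ⟨t, b, hconcat⟩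
  · rfl
  subst hconcat
  simp only [List.concat_eq_append] at hh hl ⊢
  have hlst : List.dropWhile PySem.Chars.isspace (t ++ [b]) = t ++ [b] := by
    cases t with
    | nil =>
      have hb : PySem.Chars.isspace b = false := hh b (by simp)
      simp [hb]
    | cons d r =>
      have hd : PySem.Chars.isspace d = false := hh d (by simp)
      simp [hd]
  have hrst : PySem.Chars.rstrip (t ++ [b]) = t ++ [b] := by
    have hb : PySem.Chars.isspace b = false := hl b (by simp)
    simp [PySem.Chars.rstrip, hb]
  simp only [PySem.Chars.strip, PySem.Chars.lstrip]
  rw [hlst, hrst]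

theorem pvChars_strip_cat (a b : List Char) (hA : a ≠ []) (hA2 : PySem.Chars.strip a = a)
    (hB : b ≠ []) (hB2 : PySem.Chars.strip b = b) :
    PySem.Chars.strip (a ++ ' ' :: b) = a ++ ' ' :: b := by
  apply pvChars_strip_eq_self
  · intro c hc
    apply pvChars_head_not_space a hA2 c
    obtain ⟨d, t, rfl⟩ := List.exists_cons_of_ne_nil hA
    simpa using hc
  · intro c hc
    apply pvChars_last_not_space b hB2 c
    rw [show a ++ ' ' :: b = (a ++ [' ']) ++ b by simp,
        List.getLast?_append_of_ne_nil _ hB] at hc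
    exact hc

theorem pvChars_strip_idem (l : List Char) :
    PySem.Chars.strip (PySem.Chars.strip l) = PySem.Chars.strip l := by
  apply pvChars_strip_eq_self
  · intro c hc
    have hpre : PySem.Chars.strip l <+: PySem.Chars.lstrip l := by
      rw [← List.reverse_suffix]
      simpa [PySem.Chars.strip, PySem.Chars.rstrip] using
        List.dropWhile_suffix (l := (PySem.Chars.lstrip l).reverse) PySem.Chars.isspace
    obtain ⟨t, hp⟩ := hpre
    have hy : (PySem.Chars.lstrip l).head? = some c := by
      rw [← hp]
      cases hS : PySem.Chars.strip l with
      | nil => rw [hS] at hc; simp at hc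
      | cons d r => rw [hS] at hc; simp at hc ⊢; subst hc; rfl
    have := List.head?_dropWhile_not PySem.Chars.isspace l
    simp only [PySem.Chars.lstrip] at hy
    rw [hy] at this
    exact this
  · intro c hc
    have hgl : (List.dropWhile PySem.Chars.isspace (PySem.Chars.lstrip l).reverse).head? = some c := by
      simpa [PySem.Chars.strip, PySem.Chars.rstrip, List.getLast?_reverse] using hc
    have := List.head?_dropWhile_not PySem.Chars.isspace (PySem.Chars.lstrip l).reverse
    rw [hgl] at this
    exact this

theorem pvSCs_strip (s : String) (h : PySem.Str.strip s ≠ "") : pvSCs (PySem.Str.strip s) := by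
  refine ⟨h, ?_⟩
  apply String.toList_injective
  rw [PySem.Str.toList_strip, PySem.Str.toList_strip, pvChars_strip_idem]

theorem pv_toList_cat (a b : String) : (pvCat a b).toList = a.toList ++ b.toList := by
  simp [pvCat]

theorem pvStr_strip_cat {a b : String} (ha : pvSCs a) (hb : pvSCs b) :
    PySem.Str.strip (pvCat (pvCat a " ") b) = pvCat (pvCat a " ") b := by
  apply String.toList_injective
  rw [PySem.Str.toList_strip, pv_toList_cat, pv_toList_cat]
  have hsp : (" " : String).toList = [' '] := by decide
  rw [hsp, show a.toList ++ [' '] ++ b.toList = a.toList ++ ' ' :: b.toList by simp]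
  exact pvChars_strip_cat a.toList b.toList
    (fun hn => ha.1 (by rwa [String.toList_eq_nil_iff] at hn))
    (by have := congrArg String.toList ha.2; rwa [PySem.Str.toList_strip] at this)
    (fun hn => hb.1 (by rwa [String.toList_eq_nil_iff] at hn))
    (by have := congrArg String.toList hb.2; rwa [PySem.Str.toList_strip] at this)

theorem pvSCs_cat {a b : String} (ha : pvSCs a) (hb : pvSCs b) : pvSCs (pvCat (pvCat a " ") b) := by
  refine ⟨?_, pvStr_strip_cat ha hb⟩
  intro hn
  have := congrArg String.toList hn
  rw [pv_toList_cat, pv_toList_cat] at this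
  simp at this

theorem pvMStep_inv (acc : List (String × String)) (p : String × String)
    (hacc : ∀ q ∈ acc, pvSCs q.2) (hp : pvSCs p.2) :
    ∀ q ∈ pvMStep acc p, pvSCs q.2 := by
  intro q hq
  unfold pvMStep at hq
  cases hg : acc.getLast? with
  | none =>
    rw [hg] at hq
    rcases List.mem_append.mp hq with h | h
    · exact hacc q h
    · simp at h; subst h; exact hp
  | some last =>
    rw [hg] at hq
    dsimp only at hq
    by_cases he : last.1 = p.1
    · rw [if_pos he] at hq
      rcases List.mem_append.mp hq with h | h
      · exact hacc q (List.dropLast_subset acc h)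
      · simp at h; subst h
        exact pvSCs_cat (hacc last (List.mem_of_getLast? hg)) hp
    · rw [if_neg he] at hq
      rcases List.mem_append.mp hq with h | h
      · exact hacc q h
      · simp at h; subst h; exact hp

theorem pv_foldA_eq (items : List (List (String × String))) :
    ∀ acc, (∀ p ∈ acc, pvSCs p.2) →
    items.foldl pvStepA acc = (pvPairs items).foldl pvMStep acc := by
  induction items with
  | nil => intro acc _; rfl
  | cons it rest ih =>
    intro acc hacc
    by_cases h : PySem.Str.strip (PySem.Dict.getD (PySem.Dict.mk it) "text" "") = ""
    · have h1 : pvStepA acc it = acc := by simp [pvStepA, h]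
      have h2 : pvPairs (it :: rest) = pvPairs rest := by
        simp [pvPairs, h]
      rw [List.foldl_cons, h1, h2]; exact ih acc hacc
    · have hSCtext : pvSCs (PySem.Str.strip (PySem.Dict.getD (PySem.Dict.mk it) "text" "")) :=
        pvSCs_strip _ h
      have h1 : pvStepA acc it =
          pvMStep acc (PySem.Dict.getD (PySem.Dict.mk it) "tag" "",
            PySem.Str.strip (PySem.Dict.getD (PySem.Dict.mk it) "text" "")) := by
        simp only [pvStepA, pvMStep, if_neg h]
        cases hg : acc.getLast? with
        | none => rfl
        | some last =>
          dsimp only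
          by_cases he : last.1 = PySem.Dict.getD (PySem.Dict.mk it) "tag" ""
          · have hSClast : pvSCs last.2 := hacc last (List.mem_of_getLast? hg)
            rw [if_pos he, if_pos he, pvStr_strip_cat hSClast hSCtext]
          · rw [if_neg he, if_neg he]
      have h2 : pvPairs (it :: rest) =
          (PySem.Dict.getD (PySem.Dict.mk it) "tag" "",
           PySem.Str.strip (PySem.Dict.getD (PySem.Dict.mk it) "text" "")) :: pvPairs rest := by
        simp [pvPairs, h]
      rw [List.foldl_cons, h1, h2, List.foldl_cons]
      exact ih _ (pvMStep_inv acc _ hacc hSCtext)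

theorem pvMStep_ne_nil (l : List (String × String)) (p : String × String) : pvMStep l p ≠ [] := by
  unfold pvMStep
  cases l.getLast? with
  | none => simp
  | some last => dsimp only; split <;> simp

theorem pvMStep_append (acc l : List (String × String)) (p : String × String) (hl : l ≠ []) :
    pvMStep (acc ++ l) p = acc ++ pvMStep l p := by
  unfold pvMStep
  rw [List.getLast?_append_of_ne_nil _ hl]
  cases l.getLast? with
  | none => simp
  | some last =>
    dsimp only
    split
    · rw [List.dropLast_append_of_ne_nil hl]; simp
    · simp

theorem pv_foldM_prefix (pairs : List (String × String)) :
    ∀ (acc l : List (String × String)), l ≠ [] →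
    pairs.foldl pvMStep (acc ++ l) = acc ++ pairs.foldl pvMStep l := by
  induction pairs with
  | nil => intro acc l _; rfl
  | cons p rest ih =>
    intro acc l hl
    rw [List.foldl_cons, List.foldl_cons, pvMStep_append acc l p hl]
    exact ih acc (pvMStep l p) (pvMStep_ne_nil l p)

theorem pv_join_nil (sep : String) : PySem.Str.join sep [] = "" := by
  apply String.toList_injective
  rw [PySem.Str.toList_join]
  simp [PySem.Chars.join_nil]

theorem pv_join_singleton (x : String) : PySem.Str.join " " [x] = x := by
  apply String.toList_injective
  rw [PySem.Str.toList_join]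
  simp [PySem.Chars.join_singleton]

theorem pv_join_cat (x y : String) (l : List String) :
    PySem.Str.join " " (pvCat (pvCat x " ") y :: l) = PySem.Str.join " " (x :: y :: l) := by
  apply String.toList_injective
  rw [PySem.Str.toList_join, PySem.Str.toList_join]
  have hsp : (" " : String).toList = [' '] := by decide
  cases l with
  | nil =>
    rw [List.map_cons, List.map_nil, PySem.Chars.join_singleton,
        List.map_cons, List.map_cons, List.map_nil, PySem.Chars.join_cons_cons,
        PySem.Chars.join_singleton, pv_toList_cat, pv_toList_cat, hsp]
  | cons z zs =>
    rw [List.map_cons, List.map_cons, PySem.Chars.join_cons_cons,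
        List.map_cons, List.map_cons, List.map_cons, PySem.Chars.join_cons_cons,
        PySem.Chars.join_cons_cons, pv_toList_cat, pv_toList_cat, hsp]
    simp

theorem pv_run_fold (rest : List (String × String)) :
    ∀ t x, rest.foldl pvMStep [(t, x)] =
      (t, PySem.Str.join " " (x :: (pvRun t rest).1)) :: ((pvRun t rest).2.foldl pvMStep []) := by
  induction rest with
  | nil => intro t x; simp [pvRun, pv_join_singleton]
  | cons p r ih =>
    obtain ⟨t2, y⟩ := p
    intro t x
    by_cases h : t2 = t
    · subst h
      rw [List.foldl_cons]
      have hs : pvMStep [(t2, x)] (t2, y) = [(t2, pvCat (pvCat x " ") y)] := by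
        simp [pvMStep]
      rw [hs, ih t2 (pvCat (pvCat x " ") y)]
      simp only [pvRun]
      rw [pv_join_cat]
      simp
    · rw [List.foldl_cons]
      have hs : pvMStep [(t, x)] (t2, y) = [(t, x)] ++ [(t2, y)] := by
        simp [pvMStep, Ne.symm h]
      rw [hs, pv_foldM_prefix r [(t, x)] [(t2, y)] (by simp)]
      simp only [pvRun, if_neg h]
      rw [pv_join_singleton, List.foldl_cons]
      have h0 : pvMStep [] (t2, y) = [(t2, y)] := by simp [pvMStep]
      rw [h0]
      simp

theorem pv_map_foldM (pairs : List (String × String)) :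
    (pairs.foldl pvMStep []).map pvFmt = pvLines pairs := by
  induction hn : pairs.length using Nat.strong_induction_on generalizing pairs with
  | _ n ih =>
    cases pairs with
    | nil => simp [pvLines]
    | cons p rest =>
      obtain ⟨t, x⟩ := p
      have h0 : pvMStep [] (t, x) = [(t, x)] := by simp [pvMStep]
      rw [List.foldl_cons, h0, pv_run_fold rest t x, List.map_cons]
      rw [pvLines]
      congr 1
      subst hn
      exact ih ((pvRun t rest).2.length)
        (Nat.lt_succ_of_le (pvRun_snd_length_le t rest)) _ rfl

-- ===== VERDICT (by name: the statement is the Claim_ definition above) =====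
theorem build_dialog_lines_spec : Claim_equal_build_dialog_lines := by
  intro items _
  unfold Spec_build_dialog_lines build_dialog_lines build_dialog_lines_alt
  rw [pv_foldA_eq items [] (by simp)]
  have hm := pv_map_foldM (pvPairs items)
  by_cases h : (pvPairs items).foldl pvMStep [] = []
  · rw [if_pos h]
    rw [h] at hm
    rw [← hm, List.map_nil, pv_join_nil]
  · rw [if_neg h, ← hm]
    rfl
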